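-- pv_equiv track=rewrite | github.com/lluvecwonv/Ai_mentor | ai_modules/llm_agent-main/processors/sql_processor.py | _split_response_into_chunks
-- ===== SOURCE A (Python) =====
-- def _split_response_into_chunks(response: str, chunk_size: int = 80) -> list:
--     """응답을 청크로 분할 (SQL 프로세서용)"""
--     # 문장 단위로 분할
--     sentences = []
--     current = ""
--
--     for char in response:
--         current += char
--         if char in '.!?\n' and len(current.strip()) > 10:
--             sentences.append(current.strip())
--             current = ""
--
--     if current.strip():
--         sentences.append(current.strip())
--
--     return [sentence + " " for sentence in sentences if sentence.strip()]
-- ===== SOURCE B (Python) =====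
-- def _split_response_into_chunks(response: str, chunk_size: int = 80) -> list:
--     """Split response into sentence chunks by slicing at precomputed delimiter positions."""
--     positions = [i for i, c in enumerate(response) if c in '.!?\n']
--     sentences = []
--     start = 0
--     for i in positions:
--         chunk = response[start:i + 1].strip()
--         if len(chunk) > 10:
--             sentences.append(chunk)
--             start = i + 1
--     tail = response[start:].strip()
--     if tail:
--         sentences.append(tail)
--     return [s + " " for s in sentences]
-- ===== Notes on version B (the rewrite author's own statement) =====
-- stated objective: alternative
-- what changed: B first computes the list of delimiter positions and then builds chunks by index slicing with a running start, instead of A's character-by-character string accumulation; B also drops A's redundant final non-empty filter.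
import Mathlib
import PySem

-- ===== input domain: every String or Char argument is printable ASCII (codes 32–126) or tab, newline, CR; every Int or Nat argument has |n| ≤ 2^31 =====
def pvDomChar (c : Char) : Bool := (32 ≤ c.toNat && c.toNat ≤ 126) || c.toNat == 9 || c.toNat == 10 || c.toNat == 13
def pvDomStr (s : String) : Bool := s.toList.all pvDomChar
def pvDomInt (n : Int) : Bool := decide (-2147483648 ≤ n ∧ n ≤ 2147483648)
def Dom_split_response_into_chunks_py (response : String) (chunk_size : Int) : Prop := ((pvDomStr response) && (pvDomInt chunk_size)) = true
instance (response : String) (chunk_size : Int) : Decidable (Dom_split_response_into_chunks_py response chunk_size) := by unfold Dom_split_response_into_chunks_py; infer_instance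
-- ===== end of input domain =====

-- B computes the delimiter positions first and builds chunks by index slicing with a running
-- start, instead of A's character-by-character accumulation (objective: alternative, not faster).


-- ===== PORT A =====
-- char in '.!?\n'
def pvIsDelim (c : Char) : Bool := c == '.' || c == '!' || c == '?' || c == '\n'

-- A's loop body: current += char; if char is a delimiter and len(current.strip()) > 10, flush
def pvStepA (st : List (List Char) × List Char) (c : Char) : List (List Char) × List Char :=
  let cur := st.2 ++ [c]
  if pvIsDelim c && decide (10 < (PySem.Chars.strip cur).length) then
    (st.1 ++ [PySem.Chars.strip cur], [])
  else
    (st.1, cur)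

def split_response_into_chunks_py (response : String) (chunk_size : Int) : List String :=
  let st := response.toList.foldl pvStepA ([], [])
  let sentences :=
    if PySem.Chars.strip st.2 ≠ [] then st.1 ++ [PySem.Chars.strip st.2] else st.1
  (sentences.filter (fun s => PySem.Chars.strip s ≠ [])).map (fun s => String.mk (s ++ [' ']))

-- ===== PORT B =====
-- B's loop body: chunk = response[start:i+1].strip(); if len(chunk) > 10: append, start = i+1
def pvStepB (cs : List Char) (st : List (List Char) × Int) (i : Int) : List (List Char) × Int :=
  let chunk := PySem.Chars.strip (PySem.List.slice cs (some st.2) (some (i + 1)))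
  if decide (10 < chunk.length) then (st.1 ++ [chunk], i + 1) else st

def split_response_into_chunks_py_alt (response : String) (chunk_size : Int) : List String :=
  let cs := response.toList
  let positions := ((PySem.List.enumerate cs 0).filter (fun p => pvIsDelim p.2)).map (·.1)
  let st := positions.foldl (pvStepB cs) ([], 0)
  let tail := PySem.Chars.strip (PySem.List.slice cs (some st.2) none)
  let sentences := if tail ≠ [] then st.1 ++ [tail] else st.1
  sentences.map (fun s => String.mk (s ++ [' ']))

-- ===== PRECONDITION & SPEC =====
def Spec_split_response_into_chunks_py (response : String) (chunk_size : Int) (out : List String) : Prop := out = split_response_into_chunks_py_alt response chunk_size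
instance (response : String) (chunk_size : Int) (out : List String) : Decidable (Spec_split_response_into_chunks_py response chunk_size out) := by unfold Spec_split_response_into_chunks_py; infer_instance

-- ===== CLAIM (what is proved, stated in full; the proofs are below) =====
def Claim_equal_split_response_into_chunks_py : Prop := ∀ (response : String) (chunk_size : Int), Dom_split_response_into_chunks_py response chunk_size → Spec_split_response_into_chunks_py response chunk_size (split_response_into_chunks_py response chunk_size)

-- ===== LEMMAS AND PROOFS =====

-- strip is idempotent
theorem pv_rstrip_prefix (l : List Char) : (PySem.Chars.rstrip l) <+: l := by
  unfold PySem.Chars.rstrip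
  have h := List.dropWhile_suffix (l := l.reverse) (p := PySem.Chars.isspace)
  have h2 : (List.dropWhile PySem.Chars.isspace l.reverse).reverse <+: l.reverse.reverse :=
    List.reverse_prefix.mpr (by simpa using h)
  simpa using h2

theorem pv_lstrip_of_dropWhile_eq (l : List Char) (h : l.dropWhile PySem.Chars.isspace = l) :
    PySem.Chars.lstrip (PySem.Chars.rstrip l) = PySem.Chars.rstrip l := by
  unfold PySem.Chars.lstrip
  obtain ⟨t, ht⟩ := pv_rstrip_prefix l
  cases hr : PySem.Chars.rstrip l with
  | nil => simp
  | cons a as =>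
    rw [hr] at ht
    have hl : l = a :: (as ++ t) := by rw [← ht]; simp
    rw [hl] at h
    rw [List.dropWhile_cons] at h ⊢
    split_ifs with hp
    · rw [if_pos hp] at h
      exfalso
      have hlen := congrArg List.length h
      have hle := List.length_dropWhile_le (p := PySem.Chars.isspace) (l := as ++ t)
      simp [List.length_append] at hlen hle
      omega
    · rfl

theorem pv_strip_idem (l : List Char) :
    PySem.Chars.strip (PySem.Chars.strip l) = PySem.Chars.strip l := by
  unfold PySem.Chars.strip
  rw [pv_lstrip_of_dropWhile_eq _ (by unfold PySem.Chars.lstrip; exact List.dropWhile_idempotent _ _)]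
  unfold PySem.Chars.rstrip
  simp [List.dropWhile_idempotent]

-- delimiter positions of the suffix of the string starting at index s
def pvPos (cs : List Char) (s : Int) : List Int :=
  ((PySem.List.enumerate cs s).filter (fun p => pvIsDelim p.2)).map (·.1)

theorem pvPos_nil (s : Int) : pvPos [] s = [] := rfl

theorem pvPos_cons (c : Char) (cs : List Char) (s : Int) :
    pvPos (c :: cs) s = (if pvIsDelim c then [s] else []) ++ pvPos cs (s + 1) := by
  simp only [pvPos, PySem.List.enumerate_cons, List.filter_cons]
  split_ifs with h <;> simp

-- the end-of-loop tail handling of A and B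
def pvFinishA (st : List (List Char) × List Char) : List (List Char) :=
  if PySem.Chars.strip st.2 ≠ [] then st.1 ++ [PySem.Chars.strip st.2] else st.1

def pvFinishB (full : List Char) (st : List (List Char) × Int) : List (List Char) :=
  let tail := PySem.Chars.strip (PySem.List.slice full (some st.2) none)
  if tail ≠ [] then st.1 ++ [tail] else st.1

-- main invariant: A's fold over the suffix full.drop s, with current buffer
-- full[start:s], agrees (after tail handling) with B's fold over the delimiter
-- positions of that suffix, with running start index `start`.
theorem pv_main (full : List Char) :
    ∀ (cs : List Char) (s start : Nat) (sent : List (List Char)),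
      start ≤ s → cs = full.drop s →
      pvFinishA (cs.foldl pvStepA (sent, (full.drop start).take (s - start))) =
      pvFinishB full ((pvPos cs (s : Int)).foldl (pvStepB full) (sent, (start : Int))) := by
  intro cs
  induction cs with
  | nil =>
    intro s start sent hss hcs
    have hlen : full.length ≤ s := by
      have := List.drop_eq_nil_iff.mp hcs.symm
      omega
    have hall : (full.drop start).take (s - start) = full.drop start := by
      apply List.take_of_length_le
      simp; omega
    rw [pvPos_nil]
    simp only [List.foldl_nil, pvFinishA, pvFinishB, hall,
      PySem.List.slice_from_natCast]
  | cons c rest ih =>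
    intro s start sent hss hcs
    have hrest : rest = full.drop (s + 1) := by
      have : (full.drop s).drop 1 = full.drop (s + 1) := by
        rw [List.drop_drop]
      rw [← this, ← hcs]; simp
    have hgetc : full[s]? = some c := by
      have h0 : (full.drop s)[0]? = full[s + 0]? := List.getElem?_drop
      rw [← hcs] at h0
      simpa using h0.symm
    have hcur : (full.drop start).take (s + 1 - start) =
        (full.drop start).take (s - start) ++ [c] := by
      have h1 : s + 1 - start = (s - start) + 1 := by omega
      rw [h1, List.take_succ]
      have h1' : (full.drop start)[s - start]? = full[start + (s - start)]? :=
        List.getElem?_drop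
      rw [h1', (by omega : start + (s - start) = s), hgetc]
      rfl
    rw [List.foldl_cons, pvPos_cons]
    by_cases hd : pvIsDelim c
    · -- delimiter: both sides examine the same chunk
      have hslice : PySem.List.slice full (some (start : Int)) (some ((s : Int) + 1)) =
          (full.drop start).take (s + 1 - start) := by
        have : ((s : Int) + 1) = ((s + 1 : Nat) : Int) := by push_cast; ring
        rw [this, PySem.List.slice_natCast]
      by_cases hlen : 10 < (PySem.Chars.strip ((full.drop start).take (s - start) ++ [c])).length
      · -- flush
        have hA : pvStepA (sent, (full.drop start).take (s - start)) c =
            (sent ++ [PySem.Chars.strip ((full.drop start).take (s - start) ++ [c])], []) := by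
          simp [pvStepA, hd, hlen]
        have hB : pvStepB full (sent, (start : Int)) (s : Int) =
            (sent ++ [PySem.Chars.strip ((full.drop start).take (s - start) ++ [c])], (s : Int) + 1) := by
          simp only [pvStepB, hslice, hcur]
          rw [if_pos (by simpa using hlen)]
        rw [hA, hd]
        simp only [if_pos, List.singleton_append, List.foldl_cons, hB]
        have : ((s : Int) + 1) = ((s + 1 : Nat) : Int) := by push_cast; ring
        rw [this]
        have := ih (s + 1) (s + 1)
          (sent ++ [PySem.Chars.strip ((full.drop start).take (s - start) ++ [c])])
          (by omega) hrest
        simpa using this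
      · -- no flush
        have hA : pvStepA (sent, (full.drop start).take (s - start)) c =
            (sent, (full.drop start).take (s - start) ++ [c]) := by
          simp [pvStepA, hd, hlen]
        have hB : pvStepB full (sent, (start : Int)) (s : Int) = (sent, (start : Int)) := by
          simp only [pvStepB, hslice, hcur]
          rw [if_neg (by simpa using hlen)]
        rw [hA, hd]
        simp only [if_pos, List.singleton_append, List.foldl_cons, hB]
        have := ih (s + 1) start sent (by omega) hrest
        have hc1 : ((s : Int) + 1) = ((s + 1 : Nat) : Int) := by push_cast; ring
        rw [← hcur, hc1]
        exact this
    · -- not a delimiter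
      have hA : pvStepA (sent, (full.drop start).take (s - start)) c =
          (sent, (full.drop start).take (s - start) ++ [c]) := by
        simp [pvStepA, hd]
      rw [hA]
      simp only [hd, if_neg, List.nil_append, Bool.false_eq_true, not_false_iff]
      have := ih (s + 1) start sent (by omega) hrest
      have hc1 : ((s : Int) + 1) = ((s + 1 : Nat) : Int) := by push_cast; ring
      rw [← hcur, hc1]
      exact this

-- every sentence produced by B's fold (from stripped, nonempty seeds) is stripped and nonempty
theorem pv_B_sound (full : List Char) :
    ∀ (ps : List Int) (sent : List (List Char)) (start : Int),
      (∀ x ∈ sent, PySem.Chars.strip x = x ∧ x ≠ []) →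
      ∀ x ∈ pvFinishB full (ps.foldl (pvStepB full) (sent, start)),
        PySem.Chars.strip x = x ∧ x ≠ [] := by
  intro ps
  induction ps with
  | nil =>
    intro sent start hsent x hx
    simp only [List.foldl_nil, pvFinishB] at hx
    split_ifs at hx with ht
    · rcases List.mem_append.mp hx with h | h
      · exact hsent x h
      · simp at h
        subst h
        exact ⟨pv_strip_idem _, ht⟩
    · exact hsent x hx
  | cons p ps ih =>
    intro sent start hsent x hx
    rw [List.foldl_cons] at hx
    by_cases hlen : 10 < (PySem.Chars.strip (PySem.List.slice full (some start) (some (p + 1)))).length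
    · have hB : pvStepB full (sent, start) p =
          (sent ++ [PySem.Chars.strip (PySem.List.slice full (some start) (some (p + 1)))], p + 1) := by
        simp [pvStepB, hlen]
      rw [hB] at hx
      refine ih _ _ ?_ x hx
      intro y hy
      rcases List.mem_append.mp hy with h | h
      · exact hsent y h
      · simp at h
        subst h
        refine ⟨pv_strip_idem _, ?_⟩
        intro hnil
        rw [hnil] at hlen
        simp at hlen
    · have hB : pvStepB full (sent, start) p = (sent, start) := by
        simp [pvStepB, hlen]
      rw [hB] at hx
      exact ih _ _ hsent x hx

theorem split_response_into_chunks_py_spec : Claim_equal_split_response_into_chunks_py := by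
  intro response chunk_size _
  show _ = _
  unfold split_response_into_chunks_py split_response_into_chunks_py_alt
  set full := response.toList with hfull
  have hpos : ((PySem.List.enumerate full 0).filter (fun p => pvIsDelim p.2)).map (·.1) =
      pvPos full ((0 : Nat) : Int) := by simp [pvPos]
  have hmain := pv_main full full 0 0 [] (le_refl 0) (by simp)
  simp only [Nat.sub_self, List.take_zero, List.drop_zero] at hmain
  have hsound := pv_B_sound full (pvPos full ((0 : Nat) : Int)) [] ((0 : Nat) : Int)
    (by intro x hx; simp at hx)
  have hfilter :
      (pvFinishB full ((pvPos full ((0 : Nat) : Int)).foldl (pvStepB full) ([], ((0 : Nat) : Int)))).filter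
        (fun s => decide (PySem.Chars.strip s ≠ [])) =
      pvFinishB full ((pvPos full ((0 : Nat) : Int)).foldl (pvStepB full) ([], ((0 : Nat) : Int))) := by
    apply List.filter_eq_self.mpr
    intro x hx
    obtain ⟨h1, h2⟩ := hsound x hx
    simp [h1, h2]
  simp only [pvFinishA, pvFinishB] at hmain hfilter
  simp only [hpos, Nat.cast_zero] at *
  rw [hmain, hfilter]
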